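-- pv_equiv track=rewrite | github.com/bluewings1211/YouTube_Video_Summarizer | src/utils/call_llm.py | detect_provider_from_model
-- ===== SOURCE A (Python) =====
-- def detect_provider_from_model(model: str) -> str:
--     """Detect provider from model name."""
--     if model.startswith('gpt-'):
--         return 'openai'
--     elif model.startswith('claude-'):
--         return 'anthropic'
--     elif any(model.startswith(prefix) for prefix in ['llama', 'mistral', 'qwen', 'phi', 'gemma']):
--         return 'ollama'
--     else:
--         return 'openai'  # Default to OpenAI
-- ===== SOURCE B (Python) =====
-- def detect_provider_from_model(model: str) -> str:
--     """Detect provider from model name."""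
--     # Trie-style dispatch: one look at the first character picks the single
--     # candidate prefix worth testing; no test for the prefix that maps to the default is needed, because its branch returns
--     # the default value anyway.
--     c = model[:1]
--     if c == 'c':
--         return 'anthropic' if model.startswith('claude-') else 'openai'
--     if c == 'g':
--         return 'ollama' if model.startswith('gemma') else 'openai'
--     if c == 'l':
--         return 'ollama' if model.startswith('llama') else 'openai'
--     if c == 'm':
--         return 'ollama' if model.startswith('mistral') else 'openai'
--     if c == 'q':
--         return 'ollama' if model.startswith('qwen') else 'openai'
--     if c == 'p':
--         return 'ollama' if model.startswith('phi') else 'openai'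
--     return 'openai'
-- ===== Notes on version B (the rewrite author's own statement) =====
-- stated objective: alternative
-- what changed: Replaced the ordered prefix-scan if/elif/any chain with a trie-style dispatch on the first character that runs at most one startswith test, and dropped the test for the prefix whose branch returns the default value anyway.
import Mathlib
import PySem

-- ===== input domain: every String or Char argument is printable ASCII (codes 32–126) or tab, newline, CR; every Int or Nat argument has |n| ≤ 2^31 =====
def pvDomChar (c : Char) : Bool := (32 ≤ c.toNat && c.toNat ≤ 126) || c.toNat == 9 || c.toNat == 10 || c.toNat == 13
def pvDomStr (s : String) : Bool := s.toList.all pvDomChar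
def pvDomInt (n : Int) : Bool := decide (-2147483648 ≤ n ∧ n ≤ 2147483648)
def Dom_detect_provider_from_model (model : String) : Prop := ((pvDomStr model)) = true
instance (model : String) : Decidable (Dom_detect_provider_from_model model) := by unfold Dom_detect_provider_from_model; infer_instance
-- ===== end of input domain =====

-- B replaces A's ordered prefix scan by a trie-style dispatch on the first character with at most one prefix test (alternative decomposition; same cost).

-- ===== PORT A =====
def detect_provider_from_model (model : String) : String :=
  if PySem.Str.startswith model "gpt-" then "openai"
  else if PySem.Str.startswith model "claude-" then "anthropic"
  else if (["llama", "mistral", "qwen", "phi", "gemma"].any fun pre => PySem.Str.startswith model pre) then "ollama"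
  else "openai"

-- ===== PORT B =====
-- B: trie-style dispatch on model[:1]; at most one prefix test; the redundant
-- test for the prefix whose branch returns the default is dropped.
def detect_provider_from_model_alt (model : String) : String :=
  let c := PySem.Str.slice model none (some 1)
  if c = "c" then (if PySem.Str.startswith model "claude-" then "anthropic" else "openai")
  else if c = "g" then (if PySem.Str.startswith model "gemma" then "ollama" else "openai")
  else if c = "l" then (if PySem.Str.startswith model "llama" then "ollama" else "openai")
  else if c = "m" then (if PySem.Str.startswith model "mistral" then "ollama" else "openai")
  else if c = "q" then (if PySem.Str.startswith model "qwen" then "ollama" else "openai")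
  else if c = "p" then (if PySem.Str.startswith model "phi" then "ollama" else "openai")
  else "openai"

-- ===== PRECONDITION & SPEC =====
def Spec_detect_provider_from_model (model : String) (out : String) : Prop := out = detect_provider_from_model_alt model
instance (model : String) (out : String) : Decidable (Spec_detect_provider_from_model model out) := by unfold Spec_detect_provider_from_model; infer_instance

-- ===== CLAIM (what is proved, stated in full; the proofs are below) =====
def Claim_equal_detect_provider_from_model : Prop := ∀ (model : String), Dom_detect_provider_from_model model → Spec_detect_provider_from_model model (detect_provider_from_model model)

-- ===== LEMMAS AND PROOFS =====

-- toList values of the string literals used by the ports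
theorem pvToList_gpt : "gpt-".toList = ['g','p','t','-'] := rfl
theorem pvToList_claude : "claude-".toList = ['c','l','a','u','d','e','-'] := rfl
theorem pvToList_llama : "llama".toList = ['l','l','a','m','a'] := rfl
theorem pvToList_mistral : "mistral".toList = ['m','i','s','t','r','a','l'] := rfl
theorem pvToList_qwen : "qwen".toList = ['q','w','e','n'] := rfl
theorem pvToList_phi : "phi".toList = ['p','h','i'] := rfl
theorem pvToList_gemma : "gemma".toList = ['g','e','m','m','a'] := rfl
theorem pvToList_c : "c".toList = ['c'] := rfl
theorem pvToList_g : "g".toList = ['g'] := rfl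
theorem pvToList_l : "l".toList = ['l'] := rfl
theorem pvToList_m : "m".toList = ['m'] := rfl
theorem pvToList_q : "q".toList = ['q'] := rfl
theorem pvToList_p : "p".toList = ['p'] := rfl

theorem pvKey (L : List Char) :
    (if PySem.Chars.startswith L ['g','p','t','-'] = true then "openai"
     else if PySem.Chars.startswith L ['c','l','a','u','d','e','-'] = true then "anthropic"
     else if (["llama", "mistral", "qwen", "phi", "gemma"].any fun pre => PySem.Chars.startswith L pre.toList) = true then "ollama"
     else "openai") =
    (if List.take 1 L = ['c'] then (if PySem.Chars.startswith L ['c','l','a','u','d','e','-'] = true then "anthropic" else "openai")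
     else if List.take 1 L = ['g'] then (if PySem.Chars.startswith L ['g','e','m','m','a'] = true then "ollama" else "openai")
     else if List.take 1 L = ['l'] then (if PySem.Chars.startswith L ['l','l','a','m','a'] = true then "ollama" else "openai")
     else if List.take 1 L = ['m'] then (if PySem.Chars.startswith L ['m','i','s','t','r','a','l'] = true then "ollama" else "openai")
     else if List.take 1 L = ['q'] then (if PySem.Chars.startswith L ['q','w','e','n'] = true then "ollama" else "openai")
     else if List.take 1 L = ['p'] then (if PySem.Chars.startswith L ['p','h','i'] = true then "ollama" else "openai")
     else "openai") := by
  cases L with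
  | nil => simp [PySem.Chars.startswith_iff]
  | cons c rest =>
      simp only [PySem.Chars.startswith_iff, pvToList_llama, pvToList_mistral, pvToList_qwen,
        pvToList_phi, pvToList_gemma, List.any_cons, List.any_nil, Bool.or_eq_true,
        List.cons_prefix_cons, List.take_succ_cons, List.take_zero, List.cons.injEq, and_true]
      by_cases hc : c = 'c' <;> by_cases hg : c = 'g' <;> by_cases hl : c = 'l' <;>
        by_cases hm : c = 'm' <;> by_cases hq : c = 'q' <;> by_cases hp : c = 'p' <;>
        simp_all <;>
        first
        | -- c = 'g': a string cannot start with both "pt-" and "emma"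
          (intro h1 h2
           rcases h1 with ⟨t1, ht1⟩
           rcases h2 with ⟨t2, ht2⟩
           rw [← ht1] at ht2
           simp at ht2)
        | -- c matches none of the dispatch characters: every branch condition is false
          (intro _
           simp [Ne.symm hc, Ne.symm hg, Ne.symm hl, Ne.symm hm, Ne.symm hq, Ne.symm hp])

-- ===== VERDICT (by name: the statement is the Claim_ definition above) =====
theorem detect_provider_from_model_spec : Claim_equal_detect_provider_from_model := by
  intro model _
  unfold Spec_detect_provider_from_model detect_provider_from_model detect_provider_from_model_alt
  have hslice : (PySem.Str.slice model none (some 1)).toList = model.toList.take 1 := by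
    simp [PySem.Str.slice]
    exact_mod_cast PySem.List.slice_to_natCast model.toList 1
  have heq : ∀ t : String, (PySem.Str.slice model none (some 1) = t) ↔ model.toList.take 1 = t.toList := by
    intro t
    rw [← String.toList_inj, hslice]
  simp only [heq, PySem.Str.startswith_eq, pvToList_gpt, pvToList_claude, pvToList_llama,
    pvToList_mistral, pvToList_qwen, pvToList_phi, pvToList_gemma, pvToList_c, pvToList_g,
    pvToList_l, pvToList_m, pvToList_q, pvToList_p]
  exact pvKey model.toList
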